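-- pv_equiv track=rewrite | github.com/jwhitham/aoc | 10/main.py | get_completion
-- ===== SOURCE A (Python) =====
-- import typing
--
-- CLOSING = {"(":")", "[":"]", "{":"}", "<":">"}
--
-- def get_completion(line: str) -> str:
--     expect: typing.List[str] = []
--     for ch in line:
--         if ch in CLOSING:
--             expect.append(CLOSING[ch])
--         elif (len(expect) != 0) and (expect[-1] == ch):
--             expect.pop()
--         else:
--             # corrupted line with illegal character - discard
--             return ""
--
--     return "".join(reversed(expect))
-- ===== SOURCE B (Python) =====
-- OPEN = {"(": ")", "[": "]", "{": "}", "<": ">"}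
--
-- def get_completion(line: str) -> str:
--     # global reduction: repeatedly delete adjacent matched pairs until a fixed point
--     s = line
--     while True:
--         out = []
--         i = 0
--         while i < len(s):
--             if i + 1 < len(s) and s[i] in OPEN and s[i + 1] == OPEN[s[i]]:
--                 i += 2
--             else:
--                 out.append(s[i])
--                 i += 1
--         t = "".join(out)
--         if t == s:
--             break
--         s = t
--     if all(ch in OPEN for ch in s):
--         return "".join(OPEN[ch] for ch in reversed(s))
--     return ""
-- ===== Notes on version B (the rewrite author's own statement) =====
-- stated objective: alternative
-- what changed: Replaces A's single left-to-right stack pass by a global reduction: repeatedly sweep the string deleting adjacent matched bracket pairs until a fixed point, then emit the closers of the remaining all-opener residue in reverse, or an empty completion if anything else remains (corrupted line).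
import Mathlib
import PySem

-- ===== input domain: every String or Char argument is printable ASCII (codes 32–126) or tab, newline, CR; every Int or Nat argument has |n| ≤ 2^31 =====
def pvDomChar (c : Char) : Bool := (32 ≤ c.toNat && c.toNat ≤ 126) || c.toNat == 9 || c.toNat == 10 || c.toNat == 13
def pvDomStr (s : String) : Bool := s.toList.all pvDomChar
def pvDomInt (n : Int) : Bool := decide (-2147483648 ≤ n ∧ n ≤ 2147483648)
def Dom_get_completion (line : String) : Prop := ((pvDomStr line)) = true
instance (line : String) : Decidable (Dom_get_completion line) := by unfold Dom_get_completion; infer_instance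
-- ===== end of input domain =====

-- B replaces A's single left-to-right stack pass by a global reduction (repeatedly deleting
-- adjacent matched pairs until a fixed point) — an alternative algorithm, not faster.

-- ===== PORT A =====
def CLOSING : PySem.Dict Char Char :=
  PySem.Dict.ofList [('(', ')'), ('[', ']'), ('{', '}'), ('<', '>')]

-- the 'for ch in line' loop; 'return ""' inside the loop becomes the 'none' result
def getCompletionLoop : List Char → List Char → Option (List Char)
  | [], expect => some expect
  | ch :: rest, expect =>
    if CLOSING.contains ch then
      getCompletionLoop rest (expect ++ [CLOSING.getD ch ch])
    else if PySem.List.len expect ≠ 0 ∧ PySem.List.pyGetD expect (-1) ch = ch then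
      getCompletionLoop rest expect.dropLast   -- expect.pop() (value discarded)
    else none

def get_completion (line : String) : String :=
  match getCompletionLoop line.toList [] with
  | none => ""
  | some expect =>
      String.ofList (PySem.Chars.join [] (expect.reverse.map (fun ch => [ch])))

-- ===== PORT B =====
def OPENB : PySem.Dict Char Char :=
  PySem.Dict.ofList [('(', ')'), ('[', ']'), ('{', '}'), ('<', '>')]

-- one sweep of Source B's inner 'while i < len(s)' loop; 'out' is the Python 'out' list (reversed)
def sweepGo : List Char → List Char → List Char
  | [], out => out.reverse
  | [a], out => (a :: out).reverse
  | a :: b :: t, out =>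
    if OPENB.contains a ∧ b = OPENB.getD a a then sweepGo t out
    else sweepGo (b :: t) (a :: out)
  termination_by s _ => s.length

-- termination facts for the outer 'while True' loop (cited by reduceFix's decreasing_by)
theorem sweepGo_len (s out : List Char) : (sweepGo s out).length ≤ out.length + s.length := by
  fun_induction sweepGo s out with
  | case1 out => simp
  | case2 a out => simp
  | case3 a b t out h ih => simp at ih ⊢; omega
  | case4 a b t out h ih => simp at ih ⊢; omega

theorem sweepGo_eq_or_lt (s out : List Char) :
    sweepGo s out = out.reverse ++ s ∨ (sweepGo s out).length < out.length + s.length := by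
  fun_induction sweepGo s out with
  | case1 out => left; simp
  | case2 a out => left; simp
  | case3 a b t out h ih =>
      right
      have := sweepGo_len t out
      simp; omega
  | case4 a b t out h ih =>
      rcases ih with he | hl
      · left; rw [he]; simp
      · right; simp at hl ⊢; omega

-- the outer 'while True: … if t == s: break' loop
def reduceFix (s : List Char) : List Char :=
  let t := sweepGo s []
  if t = s then s else reduceFix t
  termination_by s.length
  decreasing_by
    rcases sweepGo_eq_or_lt s [] with he | hl
    · simp only [List.reverse_nil, List.nil_append] at he
      exact absurd he (by assumption)
    · simpa using hl

def get_completion_alt (line : String) : String :=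
  let t := reduceFix line.toList
  if t.all (fun ch => OPENB.contains ch) then
    String.ofList (PySem.Chars.join [] (t.reverse.map (fun ch => [OPENB.getD ch ch])))
  else ""

-- ===== PRECONDITION & SPEC =====
def Spec_get_completion (line : String) (out : String) : Prop := out = get_completion_alt line
instance (line : String) (out : String) : Decidable (Spec_get_completion line out) := by unfold Spec_get_completion; infer_instance

-- ===== CLAIM (what is proved, stated in full; the proofs are below) =====
def Claim_equal_get_completion : Prop := ∀ (line : String), Dom_get_completion line → Spec_get_completion line (get_completion line)

-- ===== LEMMAS AND PROOFS =====

theorem OPENB_eq : OPENB = CLOSING := rfl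

theorem CLOSING_items : CLOSING.items = [('(', ')'), ('[', ']'), ('{', '}'), ('<', '>')] := by decide

theorem contains_CLOSING (ch : Char) :
    CLOSING.contains ch = (ch == '(' || ch == '[' || ch == '{' || ch == '<') := by
  simp [PySem.Dict.contains, CLOSING_items, List.any, BEq.comm, Bool.or_assoc]

theorem getD_CLOSING (ch d : Char) :
    CLOSING.getD ch d = (if ch == '(' then ')' else if ch == '[' then ']'
      else if ch == '{' then '}' else if ch == '<' then '>' else d) := by
  simp only [PySem.Dict.getD, PySem.Dict.get?, CLOSING_items, List.find?]
  by_cases h1 : ch = '(' <;> by_cases h2 : ch = '[' <;> by_cases h3 : ch = '{' <;> by_cases h4 : ch = '<' <;>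
    simp_all [BEq.comm]
  · have e1 : (ch == '(') = false := by simpa using h1
    have e2 : (ch == '[') = false := by simpa using h2
    have e3 : (ch == '{') = false := by simpa using h3
    have e4 : (ch == '<') = false := by simpa using h4
    simp [e1, e2, e3, e4]

theorem open_cases {ch : Char} (h : CLOSING.contains ch = true) :
    ch = '(' ∨ ch = '[' ∨ ch = '{' ∨ ch = '<' := by
  rw [contains_CLOSING] at h
  simpa [or_assoc] using h

theorem loop_cons (ch : Char) (rest e : List Char) :
    getCompletionLoop (ch :: rest) e
      = if CLOSING.contains ch then getCompletionLoop rest (e ++ [CLOSING.getD ch ch])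
        else if PySem.List.len e ≠ 0 ∧ PySem.List.pyGetD e (-1) ch = ch then
          getCompletionLoop rest e.dropLast
        else none := rfl

-- an opener followed by its own closer cancels, from any stack
theorem loop_pair (a b : Char) (rest e : List Char)
    (ha : CLOSING.contains a = true) (hb : b = CLOSING.getD a a) :
    getCompletionLoop (a :: b :: rest) e = getCompletionLoop rest e := by
  rcases open_cases ha with h | h | h | h <;> subst h <;> subst hb <;>
    simp [getCompletionLoop, contains_CLOSING, getD_CLOSING, PySem.List.len,
      PySem.List.pyGetD_neg_one_append_singleton] <;> omega

-- a run of openers just pushes its closers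
theorem loop_openers (p : List Char) (l e : List Char)
    (hp : ∀ x ∈ p, CLOSING.contains x = true) :
    getCompletionLoop (p ++ l) e
      = getCompletionLoop l (e ++ p.map (fun x => CLOSING.getD x x)) := by
  induction p generalizing e with
  | nil => simp
  | cons a p ih =>
      have ha := hp a (by simp)
      simp only [List.cons_append, getCompletionLoop, ha, if_pos]
      rw [ih _ (fun x hx => hp x (by simp [hx]))]
      simp

-- the accumulator of a sweep only prefixes the result
theorem sweepGo_acc : ∀ (n : Nat) (s : List Char), s.length ≤ n →
    ∀ out, sweepGo s out = out.reverse ++ sweepGo s [] := by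
  intro n
  induction n with
  | zero =>
      intro s hs out
      have : s = [] := List.length_eq_zero_iff.mp (Nat.le_zero.mp hs)
      subst this; simp [sweepGo]
  | succ n ih =>
      intro s hs out
      match s with
      | [] => simp [sweepGo]
      | [a] => simp [sweepGo]
      | a :: b :: t =>
          have he1 : ∀ o, sweepGo (a :: b :: t) o
              = if OPENB.contains a ∧ b = OPENB.getD a a then sweepGo t o
                else sweepGo (b :: t) (a :: o) := fun o => by simp [sweepGo]
          by_cases hp : OPENB.contains a ∧ b = OPENB.getD a a
          · rw [he1 out, he1 [], if_pos hp, if_pos hp]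
            exact ih t (by simp at hs ⊢; omega) out
          · rw [he1 out, he1 [], if_neg hp, if_neg hp]
            rw [ih (b :: t) (by simp at hs ⊢; omega) (a :: out),
                ih (b :: t) (by simp at hs ⊢; omega) [a]]
            simp

-- one sweep of B preserves A's loop result (from any stack)
theorem loop_sweep : ∀ (n : Nat) (s : List Char), s.length ≤ n →
    ∀ e, getCompletionLoop (sweepGo s []) e = getCompletionLoop s e := by
  intro n
  induction n with
  | zero =>
      intro s hs e
      have : s = [] := List.length_eq_zero_iff.mp (Nat.le_zero.mp hs)
      subst this; simp [sweepGo]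
  | succ n ih =>
      intro s hs e
      match s with
      | [] => simp [sweepGo]
      | [a] => simp [sweepGo]
      | a :: b :: t =>
          by_cases hp : OPENB.contains a ∧ b = OPENB.getD a a
          · rw [show sweepGo (a :: b :: t) [] = sweepGo t [] by
                simp [sweepGo, hp]]
            rw [ih t (by simp at hs ⊢; omega) e]
            rw [loop_pair a b t e (OPENB_eq ▸ hp.1) (OPENB_eq ▸ hp.2)]
          · have hbt : (b :: t).length ≤ n := by simp at hs ⊢; omega
            rw [show sweepGo (a :: b :: t) [] = a :: sweepGo (b :: t) [] by
                rw [show sweepGo (a :: b :: t) [] = sweepGo (b :: t) [a] by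
                      simp [sweepGo, hp],
                    sweepGo_acc n (b :: t) hbt [a]]
                simp]
            have hX : ∀ e', getCompletionLoop (sweepGo (b :: t) []) e'
                = getCompletionLoop (b :: t) e' := ih (b :: t) hbt
            rw [loop_cons a (sweepGo (b :: t) []) e, loop_cons a (b :: t) e]
            split_ifs with h1 h2
            · exact hX _
            · exact hX _
            · rfl

-- the whole reduction loop preserves A's loop result
theorem loop_fix (s : List Char) : ∀ e, getCompletionLoop (reduceFix s) e = getCompletionLoop s e := by
  fun_induction reduceFix s with
  | case1 s t h => intro e; rfl
  | case2 s t h ih =>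
      intro e
      rw [ih e]
      exact loop_sweep s.length s le_rfl e

-- the reduction result is a fixed point of the sweep
theorem fix_fix (s : List Char) : sweepGo (reduceFix s) [] = reduceFix s := by
  fun_induction reduceFix s with
  | case1 s t h => exact h
  | case2 s t h ih => exact ih

-- no adjacent matched pair anywhere
def pairFreeB : List Char → Bool
  | a :: b :: t => (!(CLOSING.contains a && (b == CLOSING.getD a a))) && pairFreeB (b :: t)
  | _ => true

theorem pairFreeB_tail {x : Char} {l : List Char} (h : pairFreeB (x :: l) = true) :
    pairFreeB l = true := by
  cases l with
  | nil => rfl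
  | cons y t => simp [pairFreeB] at h; exact h.2

theorem pairFreeB_adj {u v : List Char} {a b : Char}
    (h : pairFreeB (u ++ a :: b :: v) = true) :
    ¬ (CLOSING.contains a = true ∧ b = CLOSING.getD a a) := by
  induction u with
  | nil => simp [pairFreeB] at h; rintro ⟨h1, h2⟩; rcases h.1 with hf | hne <;> simp_all
  | cons x u ih => exact ih (pairFreeB_tail h)

-- a fixed point of the sweep has no adjacent matched pair
theorem fix_pairFree : ∀ (n : Nat) (s : List Char), s.length ≤ n →
    sweepGo s [] = s → pairFreeB s = true := by
  intro n
  induction n with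
  | zero =>
      intro s hs _
      have : s = [] := List.length_eq_zero_iff.mp (Nat.le_zero.mp hs)
      subst this; rfl
  | succ n ih =>
      intro s hs hfix
      match s with
      | [] => rfl
      | [a] => rfl
      | a :: b :: t =>
          by_cases hp : OPENB.contains a ∧ b = OPENB.getD a a
          · exfalso
            rw [show sweepGo (a :: b :: t) [] = sweepGo t [] by simp [sweepGo, hp]] at hfix
            have h1 : (sweepGo t []).length ≤ t.length := by simpa using sweepGo_len t []
            have h2 : (sweepGo t []).length = t.length + 2 := by rw [hfix]; simp
            omega
          · have hbt : (b :: t).length ≤ n := by simp at hs ⊢; omega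
            rw [show sweepGo (a :: b :: t) [] = a :: sweepGo (b :: t) [] by
                rw [show sweepGo (a :: b :: t) [] = sweepGo (b :: t) [a] by
                      simp [sweepGo, hp],
                    sweepGo_acc n (b :: t) hbt [a]]
                simp] at hfix
            have htail : sweepGo (b :: t) [] = b :: t := by
              injection hfix
            have hpf := ih (b :: t) hbt htail
            rw [OPENB_eq] at hp
            simp only [pairFreeB, Bool.and_eq_true, Bool.not_eq_true']
            refine ⟨?_, hpf⟩
            by_cases hca : CLOSING.contains a = true
            · simp [hca]
              intro hbeq
              exact hp ⟨hca, by simpa using hbeq⟩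
            · simp [Bool.not_eq_true] at hca
              simp [hca]

-- a run of openers pushes exactly its closers
theorem loop_all_open : ∀ (t e : List Char), (∀ c ∈ t, CLOSING.contains c = true) →
    getCompletionLoop t e = some (e ++ t.map (fun x => CLOSING.getD x x)) := by
  intro t
  induction t with
  | nil => intro e _; simp [getCompletionLoop]
  | cons a t ih =>
      intro e h
      have ha := h a (by simp)
      rw [loop_cons, if_pos ha, ih _ (fun c hc => h c (by simp [hc]))]
      simp

theorem first_nonopen {t : List Char} (h : ¬ ∀ c ∈ t, CLOSING.contains c = true) :
    ∃ p c r, t = p ++ c :: r ∧ (∀ x ∈ p, CLOSING.contains x = true) ∧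
      CLOSING.contains c = false := by
  induction t with
  | nil => exact absurd (by simp) h
  | cons a t ih =>
      by_cases ha : CLOSING.contains a = true
      · have : ¬ ∀ c ∈ t, CLOSING.contains c = true := by
          intro hall; exact h (by intro c hc; rcases List.mem_cons.mp hc with rfl | hc
                                  exacts [ha, hall c hc])
        obtain ⟨p, c, r, rfl, hp, hc⟩ := ih this
        exact ⟨a :: p, c, r, rfl, by
          intro x hx; rcases List.mem_cons.mp hx with rfl | hx
          exacts [ha, hp x hx], hc⟩
      · exact ⟨[], a, t, rfl, by simp, by simpa using ha⟩

-- a pair-free string that is not all openers corrupts A's loop from the empty stack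
theorem loop_corrupt {t : List Char} (hpf : pairFreeB t = true)
    (hno : ¬ ∀ c ∈ t, CLOSING.contains c = true) :
    getCompletionLoop t [] = none := by
  obtain ⟨p, c, r, rfl, hp, hc⟩ := first_nonopen hno
  rcases List.eq_nil_or_concat p with rfl | ⟨p', o, rfl⟩
  · rw [List.nil_append, loop_cons, if_neg (by simp [hc]), if_neg (by simp [PySem.List.len])]
  · simp only [List.concat_eq_append] at hp hpf ⊢
    rw [loop_openers (p' ++ [o]) (c :: r) [] hp, List.nil_append]
    rw [loop_cons, if_neg (by simp [hc])]
    have ho : CLOSING.contains o = true := hp o (by simp)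
    have hadj : ¬ (CLOSING.contains o = true ∧ c = CLOSING.getD o o) :=
      pairFreeB_adj (u := p') (v := r) (by simpa using hpf)
    have hne : c ≠ CLOSING.getD o o := fun hh => hadj ⟨ho, hh⟩
    rw [if_neg]
    rintro ⟨-, hlast⟩
    rw [List.map_append, List.map_cons, List.map_nil,
        PySem.List.pyGetD_neg_one_append_singleton] at hlast
    exact hne hlast.symm

-- ===== VERDICT (by name: the statement is the Claim_ definition above) =====
theorem get_completion_spec : Claim_equal_get_completion := by
  intro line _
  unfold Spec_get_completion get_completion get_completion_alt
  have hfixloop := loop_fix line.toList []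
  by_cases hall : ∀ c ∈ reduceFix line.toList, CLOSING.contains c = true
  · have hsome := loop_all_open (reduceFix line.toList) [] hall
    rw [hsome] at hfixloop
    rw [← hfixloop]
    rw [if_pos (by rw [OPENB_eq]; exact List.all_eq_true.mpr (fun c hc => hall c hc))]
    simp only [PySem.Chars.join_nil_singletons, OPENB_eq]
    rw [show ((reduceFix line.toList).reverse.map (fun ch => [CLOSING.getD ch ch]))
          = ((reduceFix line.toList).reverse.map (fun ch => CLOSING.getD ch ch)).map (fun c => [c]) by
        simp]
    rw [PySem.Chars.join_nil_singletons]
    simp [List.map_reverse]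
  · have hpf : pairFreeB (reduceFix line.toList) = true :=
      fix_pairFree (reduceFix line.toList).length _ le_rfl (fix_fix line.toList)
    have hnone := loop_corrupt hpf hall
    rw [hnone] at hfixloop
    rw [← hfixloop]
    rw [if_neg]
    intro hcon
    exact hall (fun c hc => by
      have := List.all_eq_true.mp hcon c hc
      rwa [OPENB_eq] at this)
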